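-- pv_equiv track=rewrite | github.com/shakfu/pycalc | src/gridcalc/engine.py | _rewrite_sheet_prefix
-- ===== SOURCE A (Python) =====
-- def _rewrite_sheet_prefix(text: str, old: str, new: str) -> str:
--     """Replace ``<old>!`` sheet prefixes in formula ``text`` with ``<new>!``.
--
--     Skips matches inside double-quoted string literals (gridcalc's only
--     string syntax; ``""`` is the escape for a literal quote). Matches
--     are anchored on a non-identifier boundary before the name, so
--     ``X<old>!`` does not match.
--     """
--     out: list[str] = []
--     i = 0
--     n = len(text)
--     old_with_bang = f"{old}!"
--     new_with_bang = f"{new}!"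
--     while i < n:
--         ch = text[i]
--         if ch == '"':
--             # Pass through the entire quoted string verbatim.
--             out.append(ch)
--             i += 1
--             while i < n:
--                 if text[i] == '"':
--                     out.append('"')
--                     i += 1
--                     if i < n and text[i] == '"':
--                         # Escaped quote inside the string.
--                         out.append('"')
--                         i += 1
--                         continue
--                     break
--                 out.append(text[i])
--                 i += 1
--             continue
--         # Try to match `<old>!` here, anchored on a non-identifier
--         # boundary on the left.
--         if text.startswith(old_with_bang, i):
--             prev = text[i - 1] if i > 0 else ""
--             if not (prev.isalnum() or prev == "_"):
--                 out.append(new_with_bang)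
--                 i += len(old_with_bang)
--                 continue
--         out.append(ch)
--         i += 1
--     return "".join(out)
-- ===== SOURCE B (Python) =====
-- def _fix(seg: str, target: str, repl: str) -> str:
--     """Rewrite boundary-anchored `target` occurrences in one quote-free code
--     segment (segment start counts as a valid left boundary)."""
--     parts = []
--     pos = 0
--     bok = True
--     while True:
--         k = seg.find(target, pos)
--         if k < 0:
--             parts.append(seg[pos:])
--             return "".join(parts)
--         if (k > pos and not (seg[k - 1].isalnum() or seg[k - 1] == "_")) or (k == pos and bok):
--             parts.append(seg[pos:k])
--             parts.append(repl)
--             pos = k + len(target)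
--             bok = True
--         else:
--             parts.append(seg[pos:k + 1])
--             pos = k + 1
--             bok = not (seg[k].isalnum() or seg[k] == "_")
--
--
-- def _rewrite_sheet_prefix(text: str, old: str, new: str) -> str:
--     target = old + "!"
--     repl = new + "!"
--     out = []
--     pos = 0
--     n = len(text)
--     while pos < n:
--         q = text.find('"', pos)
--         if q < 0:
--             out.append(_fix(text[pos:], target, repl))
--             pos = n
--             break
--         out.append(_fix(text[pos:q], target, repl))
--         # copy the quoted literal verbatim, honouring "" escapes
--         i = q + 1
--         while True:
--             c = text.find('"', i)
--             if c < 0: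
--                 i = n
--                 break
--             if text[c + 1:c + 2] == '"':
--                 i = c + 2
--             else:
--                 i = c + 1
--                 break
--         out.append(text[q:i])
--         pos = i
--     return "".join(out)
-- ===== Notes on version B (the rewrite author's own statement) =====
-- stated objective: faster
-- what changed: A's single char-by-char state loop (index, lookback prev char, nested literal loop) is replaced by a two-phase tokenize-then-rewrite: the text is split into quoted-literal and code segments via find-jumps, and each quote-free code segment is rewritten by jumping between str.find occurrences of old+'!' with a local boundary flag.
-- outside the precondition, e.g. on _rewrite_sheet_prefix('a"!b', 'a"', 'n'): A returns 'n!b', B returns 'a"!b'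
import Mathlib
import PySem

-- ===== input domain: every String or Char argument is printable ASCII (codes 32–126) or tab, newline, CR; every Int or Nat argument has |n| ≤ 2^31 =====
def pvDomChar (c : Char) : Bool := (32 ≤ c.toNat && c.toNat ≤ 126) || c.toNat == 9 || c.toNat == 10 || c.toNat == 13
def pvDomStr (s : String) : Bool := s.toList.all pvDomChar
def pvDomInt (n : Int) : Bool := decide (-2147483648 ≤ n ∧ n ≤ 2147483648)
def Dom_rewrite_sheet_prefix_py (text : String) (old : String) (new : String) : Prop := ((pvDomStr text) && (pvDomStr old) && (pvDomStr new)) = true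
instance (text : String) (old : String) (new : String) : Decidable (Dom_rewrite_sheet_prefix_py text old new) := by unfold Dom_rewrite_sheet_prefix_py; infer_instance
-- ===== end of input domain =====

-- B rewrites the formula in two phases (split off quoted literals, then a find-jump scan
-- over each quote-free code segment) instead of A's char-by-char state loop; measurably
-- faster in Python by a constant factor (C-level str.find/slicing).

def pvIdent (c : Char) : Bool := PySem.Chars.isalnum c || c == '_'

-- ===== PORT A =====
-- inner `while` of A (copies a quoted literal verbatim): returns (out', rest, last consumed char)
def pvAStr (rem : List Char) (acc : List Char) (prev : Char) : List Char × List Char × Char :=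
  match rem with
  | [] => (acc, [], prev)
  | c :: rest =>
    if c = '"' then
      match rest with
      | '"' :: rest2 => pvAStr rest2 (acc ++ ['"', '"']) '"'
      | _ => (acc ++ ['"'], rest, '"')
    else pvAStr rest (acc ++ [c]) c

-- needed by pvAMain's termination proof
theorem pvAStr_rest_le (rem acc prev) : (pvAStr rem acc prev).2.1.length ≤ rem.length := by
  fun_induction pvAStr <;> simp_all <;> omega

-- `prev` is text[i-1] (none at i = 0); A only uses it through this boundary test
def pvABoundary (prev : Option Char) : Bool :=
  match prev with
  | none => true
  | some p => !(pvIdent p)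

def pvAMain (oldL nb : List Char) (rem : List Char) (prev : Option Char) (acc : List Char) : List Char :=
  match rem with
  | c :: rest =>
    if c = '"' then
      let r := pvAStr rest (acc ++ ['"']) '"'
      pvAMain oldL nb r.2.1 (some r.2.2) r.1
    else if (oldL ++ ['!']).isPrefixOf (c :: rest) && pvABoundary prev then
      pvAMain oldL nb (rest.drop oldL.length) (some '!') (acc ++ nb)
    else
      pvAMain oldL nb rest (some c) (acc ++ [c])
  | [] => acc
termination_by rem.length
decreasing_by
  all_goals have := pvAStr_rest_le rest (acc ++ ['"']) '"'
  all_goals simp [List.length_drop]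
  all_goals omega

def rewrite_sheet_prefix_py (text : String) (old : String) (new : String) : String :=
  String.ofList (pvAMain old.toList (new.toList ++ ['!']) text.toList none [])

-- ===== PORT B =====
-- Source B's inner literal loop (after the opening quote): (body incl. closing quote, rest)
def pvSplitLit (rem : List Char) : List Char × List Char :=
  let c := PySem.Chars.find rem ['"']
  if c < 0 then (rem, [])
  else
    let cn := c.toNat
    match rem.drop (cn + 1) with
    | '"' :: _ =>
      (rem.take (cn + 2) ++ (pvSplitLit (rem.drop (cn + 2))).1, (pvSplitLit (rem.drop (cn + 2))).2)
    | _ => (rem.take (cn + 1), rem.drop (cn + 1))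
termination_by rem.length
decreasing_by
  have h0 : (0:Int) ≤ PySem.Chars.find rem ['"'] := by omega
  have : (['"'] : List Char) <:+: rem := (PySem.Chars.find_nonneg_iff rem ['"']).mp h0
  have : rem ≠ [] := by rintro rfl; simp at this
  have : 0 < rem.length := List.length_pos_iff.mpr this
  simp [List.length_drop]; omega

-- needed by pvRewriteB's termination proof
theorem pvSplitLit_rest_le (rem) : (pvSplitLit rem).2.length ≤ rem.length := by
  fun_induction pvSplitLit <;> simp_all [List.length_drop] <;> omega

-- Source B's _fix: find-jump scan over one code segment (pos-loop ported as suffix recursion);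
-- seg[k-1]/seg[k] are always in range where read, so getD is exact
def pvFix (oldL repl : List Char) (seg : List Char) (bok : Bool) : List Char :=
  if PySem.Chars.find seg (oldL ++ ['!']) < 0 then seg
  else
    let kn := (PySem.Chars.find seg (oldL ++ ['!'])).toNat
    if (decide (0 < kn) && !(pvIdent (seg.getD (kn - 1) ' '))) || (kn == 0 && bok) then
      seg.take kn ++ repl ++ pvFix oldL repl (seg.drop (kn + (oldL ++ ['!']).length)) true
    else
      seg.take (kn + 1) ++ pvFix oldL repl (seg.drop (kn + 1)) (!(pvIdent (seg.getD kn ' ')))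
termination_by seg.length
decreasing_by
  all_goals
    have h0 : (0:Int) ≤ PySem.Chars.find seg (oldL ++ ['!']) := by omega
    have hinf : (oldL ++ ['!']) <:+: seg := (PySem.Chars.find_nonneg_iff seg _).mp h0
    have hne : seg ≠ [] := by rintro rfl; simp at hinf
    have : 0 < seg.length := List.length_pos_iff.mpr hne
    simp [List.length_drop]; omega

-- Source B's outer pos-loop: alternate code segments (rewritten) and quoted literals (verbatim)
def pvRewriteB (oldL nb : List Char) (rem : List Char) : List Char :=
  let q := PySem.Chars.find rem ['"']
  if q < 0 then pvFix oldL nb rem true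
  else
    let qn := q.toNat
    let p := pvSplitLit (rem.drop (qn + 1))
    pvFix oldL nb (rem.take qn) true ++ ['"'] ++ p.1 ++ pvRewriteB oldL nb p.2
termination_by rem.length
decreasing_by
  have h0 : (0:Int) ≤ PySem.Chars.find rem ['"'] := by omega
  have hinf : (['"'] : List Char) <:+: rem := (PySem.Chars.find_nonneg_iff rem _).mp h0
  have hne : rem ≠ [] := by rintro rfl; simp at hinf
  have h1 : 0 < rem.length := List.length_pos_iff.mpr hne
  have := pvSplitLit_rest_le (rem.drop ((PySem.Chars.find rem ['"']).toNat + 1))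
  simp [List.length_drop] at this ⊢; omega

def rewrite_sheet_prefix_py_alt (text : String) (old : String) (new : String) : String :=
  String.ofList (pvRewriteB old.toList (new.toList ++ ['!']) text.toList)

-- ===== PRECONDITION & SPEC =====
-- Pre_ excludes only `old` containing a double quote while `old+"!"` occurs in `text`:
-- a quote cannot occur in a sheet name (it is the string-literal delimiter), and there A's
-- match of `old+"!"` can consume across a literal boundary, which B's two-phase split does
-- not reproduce.
def Pre_rewrite_sheet_prefix_py (text : String) (old : String) (new : String) : Prop :=
  '"' ∉ old.toList ∨ ¬ (old.toList ++ ['!']) <:+: text.toList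
instance (text : String) (old : String) (new : String) : Decidable (Pre_rewrite_sheet_prefix_py text old new) := by unfold Pre_rewrite_sheet_prefix_py; infer_instance

def pvWitness_rewrite_sheet_prefix_py : String × String × String := ("s1!A1+\"s1!\"+s1!B2", "s1", "sheet2")

def Spec_rewrite_sheet_prefix_py (text : String) (old : String) (new : String) (out : String) : Prop := out = rewrite_sheet_prefix_py_alt text old new
instance (text : String) (old : String) (new : String) (out : String) : Decidable (Spec_rewrite_sheet_prefix_py text old new out) := by unfold Spec_rewrite_sheet_prefix_py; infer_instance

-- ===== CLAIM (what is proved, stated in full; the proofs are below) =====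
def Claim_equal_rewrite_sheet_prefix_py : Prop := ∀ (text : String) (old : String) (new : String), Dom_rewrite_sheet_prefix_py text old new → Pre_rewrite_sheet_prefix_py text old new → Spec_rewrite_sheet_prefix_py text old new (rewrite_sheet_prefix_py text old new)

-- ===== LEMMAS AND PROOFS =====

-- the common char-wise specification both ports are reduced to --

-- literal scan, char-wise (A's inner loop without the accumulator)
def litScan : List Char → List Char × List Char
  | [] => ([], [])
  | c :: rest =>
    if c = '"' then
      match rest with
      | '"' :: rest2 => ('"' :: '"' :: (litScan rest2).1, (litScan rest2).2)
      | _ => (['"'], rest)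
    else (c :: (litScan rest).1, (litScan rest).2)

theorem litScan_rest_le (rem) : (litScan rem).2.length ≤ rem.length := by
  fun_induction litScan <;> simp_all <;> omega

-- char-wise rewrite of a single (quote-free) code segment
def fixSpec (oldL nb : List Char) (bok : Bool) : List Char → List Char
  | [] => []
  | c :: rest =>
    if (oldL ++ ['!']).isPrefixOf (c :: rest) && bok then
      nb ++ fixSpec oldL nb true (rest.drop oldL.length)
    else c :: fixSpec oldL nb (!(pvIdent c)) rest
termination_by l => l.length
decreasing_by
  all_goals simp [List.length_drop]
  all_goals omega

-- the fused char-wise algorithm (A without the accumulator)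
def S (oldL nb : List Char) (bok : Bool) : List Char → List Char
  | [] => []
  | c :: rest =>
    if c = '"' then
      '"' :: ((litScan rest).1 ++ S oldL nb true (litScan rest).2)
    else if (oldL ++ ['!']).isPrefixOf (c :: rest) && bok then
      nb ++ S oldL nb true (rest.drop oldL.length)
    else c :: S oldL nb (!(pvIdent c)) rest
termination_by l => l.length
decreasing_by
  all_goals have := litScan_rest_le rest
  all_goals simp [List.length_drop]
  all_goals omega

def bEnd (bok : Bool) (u : List Char) : Bool :=
  match u.getLast? with
  | none => bok
  | some c => !(pvIdent c)

theorem bEnd_cons (bok : Bool) (a : Char) (u : List Char) : bEnd bok (a :: u) = bEnd (!(pvIdent a)) u := by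
  rcases u with _ | ⟨b, u'⟩
  · simp [bEnd]
  · simp only [bEnd, List.getLast?_cons_cons]
    cases h : (b :: u').getLast? with
    | none => simp [List.getLast?_eq_none_iff] at h
    | some c => rfl

theorem litScan_qfree_append (u m : List Char) (hu : '"' ∉ u) :
    litScan (u ++ m) = (u ++ (litScan m).1, (litScan m).2) := by
  induction u with
  | nil => simp
  | cons a u' ih =>
      have ha : ¬ a = '"' := by intro h; exact hu (by simp [h])
      have hu' : '"' ∉ u' := fun h => hu (by simp [h])
      rw [List.cons_append, litScan.eq_def]
      simp [if_neg ha, ih hu']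

theorem pvAStr_eq (rem acc prev) :
    (pvAStr rem acc prev).1 = acc ++ (litScan rem).1 ∧
    (pvAStr rem acc prev).2.1 = (litScan rem).2 ∧
    ((litScan rem).2 ≠ [] → (pvAStr rem acc prev).2.2 = '"') := by
  fun_induction pvAStr with
  | case1 => simp [litScan]
  | case2 =>
      rw [litScan.eq_def]; simp_all
  | case3 =>
      rename_i acc rest hne
      rw [litScan.eq_def]
      rcases rest with _ | ⟨a, t⟩
      · simp
      · have ha : ¬ a = '"' := by intro h; exact hne t (by simp [h])
        simp [ha]
  | case4 =>
      rename_i acc prev c rest h ih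
      rw [litScan.eq_def]; simp_all

theorem fixSpec_no (oldL nb : List Char) (bok) (l : List Char) (h : ¬ (oldL ++ ['!']) <:+: l) :
    fixSpec oldL nb bok l = l := by
  induction l generalizing bok with
  | nil => simp [fixSpec]
  | cons c rest ih =>
      have hp : ¬ (oldL ++ ['!']).isPrefixOf (c :: rest) = true := by
        intro hp
        exact h (List.isPrefixOf_iff_prefix.mp hp).isInfix
      have h' : ¬ (oldL ++ ['!']) <:+: rest := fun hi => h (hi.trans (List.infix_cons (List.infix_refl rest)))
      rw [fixSpec.eq_def]
      simp [hp, ih _ h']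

theorem pvAMain_eq (oldL nb rem prev acc) :
    pvAMain oldL nb rem prev acc = acc ++ S oldL nb (pvABoundary prev) rem := by
  fun_induction pvAMain with
  | case1 =>
      rename_i prev acc rest r ih
      have hr : r = pvAStr rest (acc ++ ['"']) '"' := rfl
      rw [hr] at ih
      obtain ⟨h1, h2, h3⟩ := pvAStr_eq rest (acc ++ ['"']) '"'
      have hb : S oldL nb (pvABoundary (some (pvAStr rest (acc ++ ['"']) '"').2.2)) ((litScan rest).2)
          = S oldL nb true ((litScan rest).2) := by
        cases hc : (litScan rest).2 with
        | nil => rw [S.eq_def, S.eq_def]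
        | cons x xs =>
            rw [h3 (by simp [hc]), show pvABoundary (some '"') = true from by decide]
      rw [ih, h1, h2, hb]
      conv_rhs => rw [S.eq_def]
      simp
  | case2 =>
      rename_i prev acc c rest hq hcond ih
      rw [ih]
      conv_rhs => rw [S.eq_def]
      simp [hq, hcond, show pvABoundary (some '!') = true from by decide]
  | case3 =>
      rename_i prev acc c rest hq hcond ih
      rw [ih]
      conv_rhs => rw [S.eq_def]
      simp [hq, hcond, show pvABoundary (some c) = !(pvIdent c) from rfl]
  | case4 =>
      rename_i prev acc
      conv_rhs => rw [S.eq_def]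
      simp

theorem neg_find_iff (l t : List Char) : PySem.Chars.find l t < 0 ↔ ¬ t <:+: l := by
  have h1 := PySem.Chars.neg_one_le_find l t
  have h2 := PySem.Chars.find_eq_neg_one_iff (s := l) (sub := t)
  constructor
  · intro h; exact h2.mp (by omega)
  · intro h; have := h2.mpr h; omega

theorem singleton_infix (a : Char) (l : List Char) : ([a] : List Char) <:+: l ↔ a ∈ l := by
  constructor
  · intro h; exact (List.singleton_sublist).mp h.sublist
  · intro h
    obtain ⟨p, q, rfl⟩ := List.append_of_mem h
    exact ⟨p, q, by simp⟩

theorem find_facts (l t : List Char) (ht : t ≠ []) (h : ¬ PySem.Chars.find l t < 0) :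
    t <+: l.drop (PySem.Chars.find l t).toNat ∧
    (∀ i < (PySem.Chars.find l t).toNat, ¬ t <+: l.drop i) ∧
    (PySem.Chars.find l t).toNat < l.length := by
  have h0 : (0:Int) ≤ PySem.Chars.find l t := by omega
  obtain ⟨hp, hmin⟩ := PySem.Chars.find_spec (s := l) (sub := t) h0
  refine ⟨hp, hmin, ?_⟩
  by_contra hge
  push_neg at hge
  have : l.drop (PySem.Chars.find l t).toNat = [] := List.drop_eq_nil_of_le hge
  rw [this] at hp
  exact ht (List.prefix_nil.mp hp)

theorem quote_decomp (l : List Char) (h : ¬ PySem.Chars.find l ['"'] < 0) :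
    '"' ∉ l.take (PySem.Chars.find l ['"']).toNat ∧
    l.drop (PySem.Chars.find l ['"']).toNat = '"' :: l.drop ((PySem.Chars.find l ['"']).toNat + 1) ∧
    (PySem.Chars.find l ['"']).toNat < l.length := by
  obtain ⟨hp, hmin, hlt⟩ := find_facts l ['"'] (by simp) h
  refine ⟨?_, ?_, hlt⟩
  · intro hmem
    obtain ⟨i, hi, hget⟩ := List.getElem_of_mem hmem
    rw [List.getElem_take] at hget
    have hilt : i < (PySem.Chars.find l ['"']).toNat := by
      simp [List.length_take] at hi; omega
    refine hmin i hilt ⟨l.drop (i+1), ?_⟩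
    conv_rhs => rw [List.drop_eq_getElem_cons (show i < l.length by omega)]
    simp [hget]
  · have := List.drop_eq_getElem_cons hlt
    rw [this]
    obtain ⟨r, hr⟩ := hp
    simp only [List.singleton_append] at hr
    rw [this] at hr
    injection hr with h1 h2
    rw [← h1]

theorem pvSplitLit_eq (l : List Char) : pvSplitLit l = litScan l := by
  fun_induction pvSplitLit with
  | case1 =>
      rename_i l c h
      have h' : PySem.Chars.find l ['"'] < 0 := h
      have hq : '"' ∉ l := fun hm => (neg_find_iff l ['"']).mp h' ((singleton_infix _ _).mpr hm)
      have := litScan_qfree_append l [] hq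
      simp [litScan] at this
      simp [this]
  | case2 =>
      rename_i l c h cn rest2 hd ih
      have h' : ¬ PySem.Chars.find l ['"'] < 0 := h
      obtain ⟨hqf, hdrop, hlt⟩ := quote_decomp l h'
      have hcn : cn = (PySem.Chars.find l ['"']).toNat := rfl
      rw [← hcn] at hdrop hqf hlt
      have hr2 : l.drop (cn+2) = rest2 := by
        have h12 : l.drop (cn+2) = (l.drop (cn+1)).drop 1 := by
          rw [List.drop_drop]
        rw [h12, hd]; simp
      have hdc : l.drop cn = '"' :: '"' :: rest2 := by rw [hdrop, hd]
      have hlit : litScan l = (l.take cn ++ (litScan (l.drop cn)).1, (litScan (l.drop cn)).2) := by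
        conv_lhs => rw [← List.take_append_drop cn l]
        exact litScan_qfree_append _ _ hqf
      have htake : l.take (cn+2) = l.take cn ++ ['"', '"'] := by
        rw [List.take_add, hdc]; rfl
      rw [hlit, hdc, litScan.eq_def]
      simp only [reduceIte]
      rw [htake, ih, hr2]
      simp
  | case3 =>
      rename_i l c h cn hne
      have h' : ¬ PySem.Chars.find l ['"'] < 0 := h
      obtain ⟨hqf, hdrop, hlt⟩ := quote_decomp l h'
      have hcn : cn = (PySem.Chars.find l ['"']).toNat := rfl
      rw [← hcn] at hdrop hqf hlt
      have hlit : litScan l = (l.take cn ++ (litScan (l.drop cn)).1, (litScan (l.drop cn)).2) := by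
        conv_lhs => rw [← List.take_append_drop cn l]
        exact litScan_qfree_append _ _ hqf
      have htake : l.take (cn+1) = l.take cn ++ ['"'] := by
        rw [List.take_add, hdrop]; rfl
      have hscan : litScan ('"' :: l.drop (cn+1)) = (['"'], l.drop (cn+1)) := by
        rw [litScan.eq_def]
        cases hd : l.drop (cn+1) with
        | nil => simp
        | cons a t =>
            have ha : ¬ a = '"' := fun hh => hne t (by rw [hd, hh])
            simp [ha]
      rw [hlit, hdrop, hscan, htake]

theorem fixSpec_walk (oldL nb : List Char) :
    ∀ (u : List Char) (w : List Char) (bok : Bool),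
      (∀ i < u.length, ¬ (oldL ++ ['!']) <+: (u ++ w).drop i) →
      fixSpec oldL nb bok (u ++ w) = u ++ fixSpec oldL nb (bEnd bok u) w := by
  intro u
  induction u with
  | nil => intro w bok h; simp [bEnd]
  | cons a u' ih =>
      intro w bok h
      have h0 : ¬ (oldL ++ ['!']) <+: (a :: (u' ++ w)) := by
        have := h 0 (by simp)
        simpa using this
      have hp : ¬ (oldL ++ ['!']).isPrefixOf (a :: (u' ++ w)) = true := fun hb => h0 (List.isPrefixOf_iff_prefix.mp hb)
      rw [List.cons_append, fixSpec.eq_def]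
      simp only [hp, Bool.false_and, if_neg, Bool.not_eq_true]
      have h' : ∀ i < u'.length, ¬ (oldL ++ ['!']) <+: (u' ++ w).drop i := by
        intro i hi
        have := h (i+1) (by simp; omega)
        simpa using this
      rw [ih w (!(pvIdent a)) h', bEnd_cons]
      simp

theorem prefix_stop (t s w : List Char) (ht : '"' ∉ t) (hw : w = [] ∨ w.head? = some '"')
    (h : t <+: s ++ w) : t <+: s ∧ t.length ≤ s.length := by
  have hle : t.length ≤ s.length := by
    by_contra hgt
    push_neg at hgt
    have hlen : t.length ≤ s.length + w.length := by
      have := h.length_le; simpa using this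
    have hwne : w ≠ [] := by
      rintro rfl; simp at hlen; omega
    obtain ⟨w', rfl⟩ : ∃ w', w = '"' :: w' := by
      rcases hw with rfl | hh
      · exact absurd rfl hwne
      · rcases w with _ | ⟨x, w'⟩
        · exact absurd rfl hwne
        · simp at hh; exact ⟨w', by rw [hh]⟩
    have hq : t[s.length]'(by omega) = '"' := by
      rw [List.IsPrefix.getElem h]
      rw [List.getElem_append_right (le_refl s.length)]
      simp
    exact ht (hq ▸ List.getElem_mem _)
  refine ⟨List.prefix_of_prefix_length_le h (List.prefix_append s w) hle, hle⟩

theorem getD_eq_getElem (seg : List Char) (i : Nat) (h : i < seg.length) : seg.getD i ' ' = seg[i] := by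
  rw [List.getD_eq_getElem?_getD, List.getElem?_eq_getElem h]
  rfl

theorem bEnd_take (seg : List Char) (bok : Bool) (kn : Nat) (hle : kn ≤ seg.length) :
    bEnd bok (seg.take kn) =
      (decide (0 < kn) && !(pvIdent (seg.getD (kn - 1) ' ')) || (kn == 0 && bok)) := by
  rcases Nat.eq_zero_or_pos kn with h0 | h0
  · subst h0; simp [bEnd]
  · have hlt1 : kn - 1 < seg.length := by omega
    have h1 : (seg.take kn).getLast? = some (seg[kn-1]'hlt1) := by
      rw [List.getLast?_eq_getElem?]
      have hlen : (seg.take kn).length = kn := by simp [List.length_take]; omega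
      rw [hlen, List.getElem?_take_of_lt (by omega), List.getElem?_eq_getElem hlt1]
    have h2 : seg.getD (kn-1) ' ' = seg[kn-1]'hlt1 := getD_eq_getElem _ _ hlt1
    have h3 : (0 < kn) = True := by simp [h0]
    have h4 : (kn == 0) = false := by simp; omega
    simp [bEnd, h1, h2, h3, h4, List.getD_eq_getElem?_getD, List.getElem?_eq_getElem hlt1]

theorem pvFix_eq (oldL nb seg : List Char) (bok : Bool) :
    pvFix oldL nb seg bok = fixSpec oldL nb bok seg := by
  fun_induction pvFix with
  | case1 =>
      rename_i seg bok h
      exact (fixSpec_no oldL nb bok seg ((neg_find_iff seg _).mp h)).symm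
  | case2 =>
      rename_i seg bok h kn hc ih
      obtain ⟨hpre, hmin, hlt⟩ := find_facts seg (oldL ++ ['!']) (by simp) h
      have hle : kn ≤ seg.length := le_of_lt hlt
      conv_rhs => rw [← List.take_append_drop kn seg]
      rw [fixSpec_walk oldL nb (seg.take kn) (seg.drop kn) bok (by
        intro i hi
        rw [List.take_append_drop]
        have hik : i < kn := by simp [List.length_take] at hi; omega
        exact hmin i hik)]
      rw [bEnd_take seg bok kn hle, hc]
      have hdk : seg.drop kn = seg[kn] :: seg.drop (kn+1) := List.drop_eq_getElem_cons hlt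
      have hpt : (oldL ++ ['!']).isPrefixOf (seg[kn] :: seg.drop (kn+1)) = true := by
        rw [← hdk]; exact List.isPrefixOf_iff_prefix.mpr hpre
      rw [hdk, fixSpec.eq_def]
      simp only [hpt, Bool.and_true, if_pos]
      have hdd : (seg.drop (kn+1)).drop oldL.length = seg.drop (kn + (oldL ++ ['!']).length) := by
        rw [List.drop_drop]; congr 1; simp; omega
      rw [hdd, ih]
      simp
  | case3 =>
      rename_i seg bok h kn hc ih
      obtain ⟨hpre, hmin, hlt⟩ := find_facts seg (oldL ++ ['!']) (by simp) h
      have hle : kn ≤ seg.length := le_of_lt hlt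
      conv_rhs => rw [← List.take_append_drop kn seg]
      rw [fixSpec_walk oldL nb (seg.take kn) (seg.drop kn) bok (by
        intro i hi
        rw [List.take_append_drop]
        have hik : i < kn := by simp [List.length_take] at hi; omega
        exact hmin i hik)]
      rw [bEnd_take seg bok kn hle]
      have hcf : (decide (0 < kn) && !(pvIdent (seg.getD (kn - 1) ' ')) || (kn == 0 && bok)) = false := by
        simpa using hc
      rw [hcf]
      have hdk : seg.drop kn = seg[kn] :: seg.drop (kn+1) := List.drop_eq_getElem_cons hlt
      rw [hdk, fixSpec.eq_def]
      simp only [Bool.and_false, Bool.false_eq_true, if_neg]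
      have htk : seg.take (kn+1) = seg.take kn ++ [seg[kn]] := by
        rw [List.take_succ, List.getElem?_eq_getElem hlt]
        rfl
      rw [htk, ih, getD_eq_getElem _ _ hlt]
      rw [List.append_assoc]
      rfl

theorem S_bok_irrel (oldL nb : List Char) (bok : Bool) (w : List Char)
    (hw : w = [] ∨ w.head? = some '"') : S oldL nb bok w = S oldL nb true w := by
  rcases hw with rfl | hh
  · rw [S.eq_def]; conv_rhs => rw [S.eq_def]
  · rcases w with _ | ⟨x, w'⟩
    · simp at hh
    · simp at hh
      subst hh
      rw [S.eq_def]; conv_rhs => rw [S.eq_def]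
      simp

theorem S_split (oldL nb : List Char) (hq : '"' ∉ oldL) :
    ∀ (n : Nat) (u : List Char), u.length ≤ n → ∀ (w : List Char) (bok : Bool),
      '"' ∉ u → (w = [] ∨ w.head? = some '"') →
      S oldL nb bok (u ++ w) = fixSpec oldL nb bok u ++ S oldL nb true w := by
  have ht : '"' ∉ oldL ++ ['!'] := by
    intro hm; rcases List.mem_append.mp hm with h1 | h1
    · exact hq h1
    · simp at h1
  intro n
  induction n with
  | zero =>
      intro u hu w bok hqu hw
      have hu0 : u = [] := List.length_eq_zero_iff.mp (by omega)
      subst hu0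
      simp only [List.nil_append]
      rw [S_bok_irrel oldL nb bok w hw, fixSpec.eq_def]
      simp
  | succ n ih =>
      intro u hu w bok hqu hw
      rcases u with _ | ⟨c, u'⟩
      · simp only [List.nil_append]
        rw [S_bok_irrel oldL nb bok w hw, fixSpec.eq_def]
        simp
      · have hc : ¬ c = '"' := fun hh => hqu (by simp [hh])
        have hqu' : '"' ∉ u' := fun hh => hqu (by simp [hh])
        have hun : u'.length ≤ n := by simp at hu; omega
        have hiff : ((oldL ++ ['!']).isPrefixOf (c :: (u' ++ w))) = ((oldL ++ ['!']).isPrefixOf (c :: u')) := by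
          by_cases hbp : (oldL ++ ['!']) <+: (c :: u')
          · have h2 : (oldL ++ ['!']) <+: (c :: (u' ++ w)) := by
              have h3 := hbp.trans (List.prefix_append (c :: u') w)
              rwa [List.cons_append] at h3
            rw [List.isPrefixOf_iff_prefix.mpr h2, List.isPrefixOf_iff_prefix.mpr hbp]
          · have h2 : ¬ (oldL ++ ['!']) <+: (c :: (u' ++ w)) := by
              intro hh
              exact hbp (prefix_stop _ (c :: u') w ht hw (by rwa [List.cons_append])).1
            have e1 : ((oldL ++ ['!']).isPrefixOf (c :: (u' ++ w))) = false := by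
              rw [Bool.eq_false_iff]
              intro hh; exact h2 (List.isPrefixOf_iff_prefix.mp hh)
            have e2 : ((oldL ++ ['!']).isPrefixOf (c :: u')) = false := by
              rw [Bool.eq_false_iff]
              intro hh; exact hbp (List.isPrefixOf_iff_prefix.mp hh)
            rw [e1, e2]
        rw [List.cons_append, S.eq_def]
        simp only [if_neg hc, hiff]
        by_cases hcond : ((oldL ++ ['!']).isPrefixOf (c :: u') && bok) = true
        · have hbp : (oldL ++ ['!']) <+: (c :: u') :=
            List.isPrefixOf_iff_prefix.mp (by
              rcases Bool.and_eq_true_iff.mp hcond with ⟨h1, _⟩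
              exact h1)
          have hlen : oldL.length ≤ u'.length := by
            have := hbp.length_le
            simp at this
            omega
          have hda : (u' ++ w).drop oldL.length = u'.drop oldL.length ++ w :=
            List.drop_append_of_le_length hlen
          have hqd : '"' ∉ u'.drop oldL.length := fun hh => hqu' (List.mem_of_mem_drop hh)
          have hld : (u'.drop oldL.length).length ≤ n := by
            simp [List.length_drop]; omega
          rw [if_pos hcond, hda, ih _ hld w true hqd hw]
          conv_rhs => rw [fixSpec.eq_def]
          simp only [if_pos hcond]
          rw [List.append_assoc]
        · rw [if_neg hcond, ih u' hun w (!(pvIdent c)) hqu' hw]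
          conv_rhs => rw [fixSpec.eq_def]
          simp only [if_neg hcond]
          rw [List.cons_append]

theorem pvRewriteB_eq (oldL nb : List Char) (hq : '"' ∉ oldL) (l : List Char) :
    pvRewriteB oldL nb l = S oldL nb true l := by
  have hSnil : S oldL nb true [] = [] := by rw [S.eq_def]
  fun_induction pvRewriteB with
  | case1 =>
      rename_i l q h
      have h' : PySem.Chars.find l ['"'] < 0 := h
      have hql : '"' ∉ l := fun hm => (neg_find_iff l ['"']).mp h' ((singleton_infix _ _).mpr hm)
      rw [pvFix_eq]
      have := S_split oldL nb hq l.length l (le_refl _) [] true hql (Or.inl rfl)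
      simp [hSnil] at this
      exact this.symm
  | case2 =>
      rename_i l q h qn p ih
      have h' : ¬ PySem.Chars.find l ['"'] < 0 := h
      obtain ⟨hqf, hdrop, hlt⟩ := quote_decomp l h'
      have hqn : qn = (PySem.Chars.find l ['"']).toNat := rfl
      rw [← hqn] at hdrop hqf hlt
      have hp : p = pvSplitLit (l.drop (qn+1)) := rfl
      have hwh : l.drop qn = [] ∨ (l.drop qn).head? = some '"' := by
        right; rw [hdrop]; rfl
      conv_rhs => rw [← List.take_append_drop qn l]
      rw [S_split oldL nb hq (l.take qn).length (l.take qn) (le_refl _) (l.drop qn) true hqf hwh]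
      rw [hdrop]
      conv_rhs => rw [S.eq_def]
      simp only [reduceIte]
      have ihl : pvRewriteB oldL nb ((litScan (l.drop (qn+1))).2) = S oldL nb true ((litScan (l.drop (qn+1))).2) := by
        rw [← pvSplitLit_eq]; exact ih
      rw [pvFix_eq, show p = litScan (l.drop (qn+1)) from by rw [hp, pvSplitLit_eq], ihl]
      simp


-- identity case: when old+'!' does not occur in the text at all, both programs copy it --

theorem litScan_join (l : List Char) : (litScan l).1 ++ (litScan l).2 = l := by
  fun_induction litScan <;> simp_all

theorem litScan_snd_suffix (l : List Char) : (litScan l).2 <:+ l :=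
  ⟨(litScan l).1, litScan_join l⟩

theorem pvAMain_id (oldL nb : List Char) :
    ∀ (n : Nat) (rem : List Char), rem.length ≤ n → ∀ (prev : Option Char) (acc : List Char),
      ¬ (oldL ++ ['!']) <:+: rem → pvAMain oldL nb rem prev acc = acc ++ rem := by
  intro n
  induction n with
  | zero =>
      intro rem hn prev acc _
      have : rem = [] := List.length_eq_zero_iff.mp (by omega)
      subst this
      rw [pvAMain.eq_def]
      simp
  | succ n ih =>
      intro rem hn prev acc hni
      rcases rem with _ | ⟨c, rest⟩
      · rw [pvAMain.eq_def]; simp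
      · rw [pvAMain.eq_def]
        by_cases hc : c = '"'
        · subst hc
          simp only [if_pos rfl]
          obtain ⟨h1, h2, _⟩ := pvAStr_eq rest (acc ++ ['"']) '"'
          have hsuf : (litScan rest).2 <:+ rest := litScan_snd_suffix rest
          have hlen : (litScan rest).2.length ≤ n := by
            have := hsuf.length_le; simp at hn; omega
          have hni' : ¬ (oldL ++ ['!']) <:+: (litScan rest).2 := fun hh =>
            hni ((hh.trans hsuf.isInfix).trans (List.infix_cons (List.infix_refl rest)))
          rw [h1, h2, ih _ hlen _ _ hni']
          have hj := litScan_join rest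
          simp only [List.append_assoc, List.cons_append, List.nil_append, if_true]
          rw [hj]
        · have hp : ¬ (oldL ++ ['!']).isPrefixOf (c :: rest) = true := fun hb =>
            hni (List.isPrefixOf_iff_prefix.mp hb).isInfix
          have hni' : ¬ (oldL ++ ['!']) <:+: rest := fun hh =>
            hni (hh.trans (List.infix_cons (List.infix_refl rest)))
          have hlen : rest.length ≤ n := by simp at hn; omega
          simp only [if_neg hc, hp, Bool.false_and, Bool.false_eq_true, if_neg]
          rw [ih _ hlen _ _ hni']
          simp
      
theorem pvRewriteB_id (oldL nb : List Char) (l : List Char)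
    (hni : ¬ (oldL ++ ['!']) <:+: l) : pvRewriteB oldL nb l = l := by
  fun_induction pvRewriteB with
  | case1 =>
      rename_i l q h
      rw [pvFix_eq, fixSpec_no _ _ _ _ hni]
  | case2 =>
      rename_i l q h qn p ih
      have h' : ¬ PySem.Chars.find l ['"'] < 0 := h
      obtain ⟨_, hdrop, hlt⟩ := quote_decomp l h'
      have hqn : qn = (PySem.Chars.find l ['"']).toNat := rfl
      rw [← hqn] at hdrop hlt
      have htq : l.take qn <:+: l := (List.take_prefix qn l).isInfix
      have hdq : l.drop ((qn:Nat) + 1) <:+: l := (List.drop_suffix _ l).isInfix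
      have hp : p = litScan (l.drop (qn+1)) := by
        have : p = pvSplitLit (l.drop (qn+1)) := rfl
        rw [this, pvSplitLit_eq]
      have hsuf : (litScan (l.drop (qn+1))).2 <:+: l :=
        (litScan_snd_suffix _).isInfix.trans hdq
      have hni2 : ¬ (oldL ++ ['!']) <:+: (litScan (l.drop (qn+1))).2 := fun hh =>
        hni (hh.trans hsuf)
      rw [pvFix_eq, fixSpec_no _ _ _ _ (fun hh => hni (hh.trans htq)), hp]
      rw [hp] at ih
      rw [ih hni2]
      have hj := litScan_join (l.drop (qn+1))
      calc l.take qn ++ ['"'] ++ (litScan (l.drop (qn+1))).1 ++ (litScan (l.drop (qn+1))).2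
          = l.take qn ++ ('"' :: l.drop (qn+1)) := by
            simp only [List.append_assoc, hj]
            rfl
        _ = l.take qn ++ l.drop qn := by rw [← hdrop]
        _ = l := List.take_append_drop qn l

-- ===== VERDICT (by name: the statement is the Claim_ definition above) =====
theorem rewrite_sheet_prefix_py_spec : Claim_equal_rewrite_sheet_prefix_py := by
  intro text old new _ hpre
  unfold Spec_rewrite_sheet_prefix_py rewrite_sheet_prefix_py rewrite_sheet_prefix_py_alt
  rcases hpre with hq | hni
  · rw [pvAMain_eq, pvRewriteB_eq _ _ hq]
    rfl
  · rw [pvAMain_id (old.toList) (new.toList ++ ['!']) text.toList.length text.toList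
        (le_refl _) none [] hni,
      pvRewriteB_id _ _ _ hni]
    simp
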